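-- pv_equiv track=rewrite | github.com/ssoyeong-lee/Baekjoon | 백준/Silver/7795. 먹을 것인가 먹힐 것인가/먹을 것인가 먹힐 것인가.py | solution
-- ===== SOURCE A (Python) =====
-- def solution(a, b):
--   a.sort(); b.sort()
--
--   ret = 0
--   i = j = 0
--   tmp = 0
--   while i < len(a) and j < len(b):
--     if a[i] <= b[j]:
--       ret += tmp
--       i += 1
--     else:
--       tmp = j + 1
--       j += 1
--
--   if i != len(a):
--     ret += (len(a) - i) * len(b)
--   return ret
-- ===== SOURCE B (Python) =====
-- def bisect_left(xs, x):
--     """Leftmost insertion point of x in sorted xs = number of elements < x."""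
--     lo, hi = 0, len(xs)
--     while lo < hi:
--         mid = (lo + hi) // 2
--         if xs[mid] < x:
--             lo = mid + 1
--         else:
--             hi = mid
--     return lo
--
-- def solution(a, b):
--     # Sort both in place (A also sorts its arguments in place).
--     a.sort()
--     b.sort()
--     # For each x in a, count the b-elements strictly below x by binary search.
--     return sum(bisect_left(b, x) for x in a)
-- ===== Notes on version B (the rewrite author's own statement) =====
-- stated objective: alternative
-- what changed: Replaces A's merge-style two-pointer sweep (with the running 'tmp' counter and a leftover-tail correction) by an independent binary search per element: sort both lists, then sum bisect_left(b, x) over x in a.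
import Mathlib
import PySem

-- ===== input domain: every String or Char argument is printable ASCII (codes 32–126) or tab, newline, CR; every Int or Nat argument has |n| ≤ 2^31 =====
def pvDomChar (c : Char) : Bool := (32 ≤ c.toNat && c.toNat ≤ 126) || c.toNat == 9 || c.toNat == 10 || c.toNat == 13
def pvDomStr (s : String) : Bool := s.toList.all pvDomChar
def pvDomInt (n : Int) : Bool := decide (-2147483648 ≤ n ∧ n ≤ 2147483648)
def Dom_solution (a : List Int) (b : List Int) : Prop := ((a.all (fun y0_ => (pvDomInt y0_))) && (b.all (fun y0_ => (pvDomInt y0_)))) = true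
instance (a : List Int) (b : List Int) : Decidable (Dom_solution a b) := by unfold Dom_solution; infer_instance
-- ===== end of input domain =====

-- B replaces A's merge-style two-pointer sweep by sort + one binary search (bisect_left) per
-- element of a; equivalence is about the RETURN value (both A and B sort the arguments in place).

-- ===== PORT A =====
-- the while loop of A: state (i, j, ret, tmp); the post-loop tail correction happens on exit
def solLoop (a : List Int) (b : List Int) (i : Nat) (j : Nat) (ret : Int) (tmp : Int) : Int :=
  if h : i < a.length ∧ j < b.length then
    if a[i]'h.1 ≤ b[j]'h.2 then
      solLoop a b (i + 1) j (ret + tmp) tmp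
    else
      solLoop a b i (j + 1) ret ((j : Int) + 1)
  else
    if i ≠ a.length then ret + ((a.length : Int) - (i : Int)) * (b.length : Int) else ret
termination_by (a.length - i) + (b.length - j)
decreasing_by
  · omega
  · omega

def solution (a : List Int) (b : List Int) : Int :=
  solLoop (PySem.List.sorted a (fun x => x)) (PySem.List.sorted b (fun x => x)) 0 0 0 0

-- ===== PORT B =====
-- Source B's bisect_left is the standard-library binary search, ported as PySem.List.bisectLeft
def solution_alt (a : List Int) (b : List Int) : Int :=
  let a' := PySem.List.sorted a (fun x => x)
  let b' := PySem.List.sorted b (fun x => x)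
  (a'.map (fun x => ((PySem.List.bisectLeft b' x : Nat) : Int))).sum

-- ===== PRECONDITION & SPEC =====
def Spec_solution (a : List Int) (b : List Int) (out : Int) : Prop := out = solution_alt a b
instance (a : List Int) (b : List Int) (out : Int) : Decidable (Spec_solution a b out) := by unfold Spec_solution; infer_instance

-- ===== CLAIM (what is proved, stated in full; the proofs are below) =====
def Claim_equal_solution : Prop := ∀ (a : List Int) (b : List Int), Dom_solution a b → Spec_solution a b (solution a b)

-- ===== LEMMAS AND PROOFS =====

-- Σ over the tail of a (from index i) of "how many b-elements are < that element"
def pvS (a : List Int) (b : List Int) (i : Nat) : Int :=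
  ((a.drop i).map (fun x => ((b.countP (fun y => decide (y < x)) : Nat) : Int))).sum

theorem pvS_step (a b : List Int) (i : Nat) (h : i < a.length) :
    pvS a b i = ((b.countP (fun y => decide (y < a[i])) : Nat) : Int) + pvS a b (i + 1) := by
  unfold pvS
  rw [List.drop_eq_getElem_cons h]
  simp only [List.map_cons, List.sum_cons]

theorem count_prefix (l : List Int) (p : Int → Bool) (j : Nat) (hj : j ≤ l.length)
    (h1 : ∀ k (hk : k < l.length), k < j → p l[k])
    (h2 : ∀ k (hk : k < l.length), j ≤ k → p l[k] = false) :
    l.countP p = j := by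
  have hsplit : l.countP p = (l.take j).countP p + (l.drop j).countP p := by
    conv_lhs => rw [← List.take_append_drop j l]
    exact List.countP_append ..
  have htake : (l.take j).countP p = j := by
    have hall : ∀ x ∈ l.take j, p x := by
      intro x hx
      rcases List.mem_iff_getElem.mp hx with ⟨k, hk, rfl⟩
      have hk' : k < j := by
        have := hk; simp [List.length_take] at this; omega
      have hkl : k < l.length := by omega
      have : (l.take j)[k] = l[k] := by simp
      rw [this]; exact h1 k hkl hk'
    rw [List.countP_eq_length.mpr hall]
    simp [List.length_take]; omega
  have hdrop : (l.drop j).countP p = 0 := by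
    have hall : ∀ x ∈ l.drop j, ¬ p x := by
      intro x hx
      rcases List.mem_iff_getElem.mp hx with ⟨k, hk, rfl⟩
      have hkl : j + k < l.length := by
        have := hk; simp [List.length_drop] at this; omega
      have : (l.drop j)[k] = l[j + k] := by simp
      rw [this]
      simp [h2 (j + k) hkl (by omega)]
    simp [List.countP_eq_zero.mpr hall]
  omega

theorem pairwise_mono (l : List Int) (hl : l.Pairwise (· ≤ ·)) (p q : Nat) (hpq : p ≤ q)
    (hq : q < l.length) : l[p]'(lt_of_le_of_lt hpq hq) ≤ l[q] := by
  rcases Nat.lt_or_ge p q with h | h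
  · exact List.pairwise_iff_getElem.mp hl p q _ _ h
  · have : p = q := by omega
    subst this; exact le_refl _

theorem loop_eq (a b : List Int) (ha : a.Pairwise (· ≤ ·)) (hb : b.Pairwise (· ≤ ·)) :
    ∀ n i j ret, (a.length - i) + (b.length - j) ≤ n → i ≤ a.length → j ≤ b.length →
    (∀ k (hk : k < b.length), k < j → ∀ i' (hi' : i' < a.length), i ≤ i' → b[k] < a[i']) →
    solLoop a b i j ret (j : Int) = ret + pvS a b i := by
  intro n
  induction n with
  | zero =>
    intro i j ret hn hi hj _
    have hia : i = a.length := by omega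
    rw [solLoop]
    rw [dif_neg (by omega)]
    rw [if_neg (by omega)]
    subst hia
    simp [pvS, List.drop_length]
  | succ n ih =>
    intro i j ret hn hi hj hinv
    rw [solLoop]
    by_cases hg : i < a.length ∧ j < b.length
    · rw [dif_pos hg]
      by_cases hc : a[i]'hg.1 ≤ b[j]'hg.2
      · rw [if_pos hc]
        have hcount : b.countP (fun y => decide (y < a[i]'hg.1)) = j := by
          apply count_prefix _ _ _ hj
          · intro k hk hkj
            simp only [decide_eq_true_eq]
            exact hinv k hk hkj i hg.1 (le_refl i)
          · intro k hk hkj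
            simp only [decide_eq_false_iff_not, not_lt]
            calc a[i]'hg.1 ≤ b[j]'hg.2 := hc
            _ ≤ b[k] := pairwise_mono b hb j k hkj hk
        have hrec := ih (i + 1) j (ret + (j : Int)) (by omega) (by omega) hj
          (by
            intro k hk hkj i' hi' hii'
            exact hinv k hk hkj i' hi' (by omega))
        rw [hrec]
        rw [pvS_step a b i hg.1, hcount]
        ring
      · rw [if_neg hc]
        have hbj : b[j]'hg.2 < a[i]'hg.1 := by omega
        have hrec := ih i (j + 1) ret (by omega) hi (by omega)
          (by
            intro k hk hkj i' hi' hii'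
            rcases Nat.lt_or_ge k j with hkj' | hkj'
            · exact hinv k hk hkj' i' hi' hii'
            · have hkeq : k = j := by omega
              subst hkeq
              calc b[k] < a[i]'hg.1 := hbj
              _ ≤ a[i'] := pairwise_mono a ha i i' hii' hi')
        push_cast at hrec
        exact hrec
    · rw [dif_neg hg]
      by_cases hia : i = a.length
      · rw [if_neg (by omega)]
        subst hia
        simp [pvS, List.drop_length]
      · rw [if_pos hia]
        have hilt : i < a.length := by omega
        have hjb : j = b.length := by omega
        subst hjb
        have hS : pvS a b i = ((a.length - i : Nat) : Int) * (b.length : Int) := by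
          unfold pvS
          have hall : ∀ x ∈ a.drop i,
              (fun x => ((b.countP (fun y => decide (y < x)) : Nat) : Int)) x = (b.length : Int) := by
            intro x hx
            rcases List.mem_iff_getElem.mp hx with ⟨k, hk, rfl⟩
            have hkl : i + k < a.length := by
              have := hk; simp [List.length_drop] at this; omega
            have hxe : (a.drop i)[k] = a[i + k] := by simp
            rw [hxe]
            have hfull : b.countP (fun y => decide (y < a[i + k])) = b.length := by
              apply List.countP_eq_length.mpr
              intro y hy
              rcases List.mem_iff_getElem.mp hy with ⟨m, hm, rfl⟩
              simp only [decide_eq_true_eq]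
              exact hinv m hm hm (i + k) hkl (by omega)
            simp [hfull]
          rw [List.map_congr_left hall]
          simp [List.sum_replicate, List.map_const']
        rw [hS]
        have : ((a.length - i : Nat) : Int) = (a.length : Int) - (i : Int) := by
          omega
        rw [this]
  
theorem bisect_eq_countP (l : List Int) (hl : l.Pairwise (· ≤ ·)) (x : Int) :
    PySem.List.bisectLeft l x = l.countP (fun y => decide (y < x)) := by
  obtain ⟨h0, h1, h2⟩ := PySem.List.bisectLeft_spec l x hl
  symm
  apply count_prefix _ _ _ h0
  · intro k hk hkj
    simp only [decide_eq_true_eq]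
    exact h1 k hk hkj
  · intro k hk hkj
    simp only [decide_eq_false_iff_not, not_lt]
    exact h2 k hk hkj

theorem solution_eq_alt (a b : List Int) : solution a b = solution_alt a b := by
  simp only [solution, solution_alt]
  have ha := PySem.List.sorted_pairwise a (fun x => x)
  have hb := PySem.List.sorted_pairwise b (fun x => x)
  have hloop := loop_eq (PySem.List.sorted a (fun x => x)) (PySem.List.sorted b (fun x => x))
    ha hb ((PySem.List.sorted a (fun x => x)).length + (PySem.List.sorted b (fun x => x)).length)
    0 0 0 (by omega) (by omega) (by omega) (by intro k hk hkj; omega)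
  simp only [Nat.cast_zero] at hloop
  rw [hloop]
  have hmap : ∀ x ∈ PySem.List.sorted a (fun x => x),
      ((PySem.List.bisectLeft (PySem.List.sorted b (fun x => x)) x : Nat) : Int)
      = (((PySem.List.sorted b (fun x => x)).countP (fun y => decide (y < x)) : Nat) : Int) := by
    intro x _
    rw [bisect_eq_countP _ hb x]
  rw [List.map_congr_left hmap]
  simp [pvS]

-- ===== VERDICT (by name: the statement is the Claim_ definition above) =====
theorem solution_spec : Claim_equal_solution := by
  intro a b _
  unfold Spec_solution
  exact solution_eq_alt a b
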